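-- pv_equiv track=rewrite | github.com/DEFY-AK15/3D-molecule-modeling | main.py | find_unshared_electron
-- ===== SOURCE A (Python) =====
-- posx = [-1,0,1,0]
--
-- posy = [0,-1,0,1]
--
-- def find_unshared_electron(lewis_dot):
--     result={}
--     for i in range(len(lewis_dot)):
--         for j in range(len(lewis_dot[i])):
--             temp = lewis_dot[i][j]
--             if not temp in [" ","-","=","+"]:
--                 connect_electron = 0
--                 for k in range(4):
--                     y,x = i+posy[k], j+posx[k]
--                     if 0<=y<len(lewis_dot) and 0<=x<len(lewis_dot[y]):
--                         temp2 = lewis_dot[y][x]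
--                         if temp2 == "-":
--                             connect_electron+=2
--                         if temp2 == "=":
--                             connect_electron+=4
--                         if temp2 == "+":
--                             connect_electron+=6
--                 if temp in ["H","B","Be"]:
--                     continue
--                 elif connect_electron<8:
--                     result[(i,j)] = (8-connect_electron)//2
--     return result
-- ===== SOURCE B (Python) =====
-- posx = [-1,0,1,0]
-- posy = [0,-1,0,1]
--
-- WEIGHT = {"-": 2, "=": 4, "+": 6}
-- SKIP = {"H", "B", "Be"}
--
-- def find_unshared_electron(lewis_dot):
--     # pass 1: scatter each bond cell's weight onto its four orthogonal neighbours
--     acc = {}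
--     for i, row in enumerate(lewis_dot):
--         for j, ch in enumerate(row):
--             w = WEIGHT.get(ch)
--             if w is not None:
--                 for dy, dx in zip(posy, posx):
--                     p = (i + dy, j + dx)
--                     acc[p] = acc.get(p, 0) + w
--     # pass 2: read the accumulated connect electrons at each atom cell
--     result = {}
--     for i, row in enumerate(lewis_dot):
--         for j, ch in enumerate(row):
--             if ch in " -=+":
--                 continue
--             if ch in SKIP:
--                 continue
--             c = acc.get((i, j), 0)
--             if c < 8:
--                 result[(i, j)] = (8 - c) // 2
--     return result
-- ===== Notes on version B (the rewrite author's own statement) =====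
-- stated objective: faster
-- what changed: Replaces the per-atom gather (for every cell, an inner 4-direction loop with a bounds test and repeated indexing into the row list) by a two-pass scatter: one pass adds each bond cell's weight (2/4/6) into a dict keyed by its four neighbour positions, a second pass over atom cells reads the accumulated count with a single dict lookup and emits (8-c)//2 when c<8.
import Mathlib
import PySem

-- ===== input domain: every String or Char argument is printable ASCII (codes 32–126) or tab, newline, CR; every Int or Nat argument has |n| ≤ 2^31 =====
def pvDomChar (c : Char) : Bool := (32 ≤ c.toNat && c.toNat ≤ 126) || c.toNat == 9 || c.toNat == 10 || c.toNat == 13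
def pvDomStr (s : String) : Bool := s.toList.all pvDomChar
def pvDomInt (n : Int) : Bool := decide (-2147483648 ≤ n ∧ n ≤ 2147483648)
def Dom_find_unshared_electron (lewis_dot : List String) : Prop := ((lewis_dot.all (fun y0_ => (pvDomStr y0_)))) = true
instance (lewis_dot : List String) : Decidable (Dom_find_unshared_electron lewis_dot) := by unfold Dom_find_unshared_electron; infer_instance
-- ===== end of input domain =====

-- B replaces A's per-atom gather (bounds-checked lookups in the four directions) by a
-- two-pass scatter: bond cells add their weight into a dict of neighbour positions,
-- then atom cells read the accumulated count; same values, alternative decomposition.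


-- ===== PORT A =====
def posxA : List Int := [-1, 0, 1, 0]
def posyA : List Int := [0, -1, 0, 1]

-- Literal port of A.  Strings are viewed as their character lists (exact for the
-- indexing and len used here).  temp is a single character, so the Python comparison
-- with "Be" never holds and only "H"/"B" can match in the skip test.  The result
-- dict's keys (i, j) are pairwise distinct fresh keys, so the dict in insertion
-- order is exactly the appended list built here.
def find_unshared_electron (lewis_dot : List String) : List (Int × Int × Int) :=
  let rows : List (List Char) := lewis_dot.map (·.toList)
  (PySem.List.pyRange 0 rows.length 1).foldl (fun result i =>
    (PySem.List.pyRange 0 (PySem.List.pyGetD rows i []).length 1).foldl (fun result j =>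
      let temp := PySem.List.pyGetD (PySem.List.pyGetD rows i []) j ' '
      if temp = ' ' ∨ temp = '-' ∨ temp = '=' ∨ temp = '+' then result
      else
        let ce : Int := (PySem.List.pyRange 0 4 1).foldl (fun ce k =>
          let y := i + PySem.List.pyGetD posyA k 0
          let x := j + PySem.List.pyGetD posxA k 0
          if 0 ≤ y ∧ y < (rows.length : Int) ∧ 0 ≤ x ∧ x < ((PySem.List.pyGetD rows y []).length : Int) then
            let temp2 := PySem.List.pyGetD (PySem.List.pyGetD rows y []) x ' '
            let ce := if temp2 = '-' then ce + 2 else ce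
            let ce := if temp2 = '=' then ce + 4 else ce
            if temp2 = '+' then ce + 6 else ce
          else ce) 0
        if temp = 'H' ∨ temp = 'B' then result
        else if ce < 8 then result ++ [(i, j, PySem.Int.floordiv (8 - ce) 2)]
        else result) result) []

-- ===== PORT B =====
-- B-side helpers (WEIGHT.get and zip(posy, posx))
def wOpt (c : Char) : Option Int :=
  if c = '-' then some 2 else if c = '=' then some 4 else if c = '+' then some 6 else none
def dirsB : List (Int × Int) := [(0, -1), (-1, 0), (0, 1), (1, 0)]

-- Literal port of B (Source B): scatter pass building the dict acc, then a read pass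
-- over atom cells.  As in A's port, a single character can never equal "Be".
def find_unshared_electron_alt (lewis_dot : List String) : List (Int × Int × Int) :=
  let rows : List (List Char) := lewis_dot.map (·.toList)
  let acc : PySem.Dict (Int × Int) Int :=
    (PySem.List.enumerate rows).foldl (fun acc ir =>
      (PySem.List.enumerate ir.2).foldl (fun acc jc =>
        match wOpt jc.2 with
        | none => acc
        | some w => dirsB.foldl (fun acc d =>
            acc.modify (ir.1 + d.1, jc.1 + d.2) 0 (· + w)) acc) acc) PySem.Dict.empty
  (PySem.List.enumerate rows).foldl (fun res ir =>
    (PySem.List.enumerate ir.2).foldl (fun res jc =>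
      if jc.2 = ' ' ∨ jc.2 = '-' ∨ jc.2 = '=' ∨ jc.2 = '+' then res
      else if jc.2 = 'H' ∨ jc.2 = 'B' then res
      else
        let c := acc.getD (ir.1, jc.1) 0
        if c < 8 then res ++ [(ir.1, jc.1, PySem.Int.floordiv (8 - c) 2)]
        else res) res) []

-- ===== PRECONDITION & SPEC =====
def Spec_find_unshared_electron (lewis_dot : List String) (out : List (Int × Int × Int)) : Prop := out = find_unshared_electron_alt lewis_dot
instance (lewis_dot : List String) (out : List (Int × Int × Int)) : Decidable (Spec_find_unshared_electron lewis_dot out) := by unfold Spec_find_unshared_electron; infer_instance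

-- ===== CLAIM (what is proved, stated in full; the proofs are below) =====
def Claim_equal_find_unshared_electron : Prop := ∀ (lewis_dot : List String), Dom_find_unshared_electron lewis_dot → Spec_find_unshared_electron lewis_dot (find_unshared_electron lewis_dot)

-- ===== LEMMAS AND PROOFS =====

def wC (c : Char) : Int := if c = '-' then 2 else if c = '=' then 4 else if c = '+' then 6 else 0
def cellW (rows : List (List Char)) (y x : Int) : Int :=
  if 0 ≤ y ∧ y < (rows.length : Int) ∧ 0 ≤ x ∧ x < ((PySem.List.pyGetD rows y []).length : Int) then
    wC (PySem.List.pyGetD (PySem.List.pyGetD rows y []) x ' ')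
  else 0
def gather (rows : List (List Char)) (i j : Int) : Int :=
  cellW rows i (j + -1) + cellW rows (i + -1) j + cellW rows i (j + 1) + cellW rows (i + 1) j

theorem chain3 (ce : Int) (c : Char) :
    (if c = '+' then (if c = '=' then (if c = '-' then ce + 2 else ce) + 4
                      else (if c = '-' then ce + 2 else ce)) + 6
     else (if c = '=' then (if c = '-' then ce + 2 else ce) + 4
           else (if c = '-' then ce + 2 else ce))) = ce + wC c := by
  unfold wC; split_ifs <;> simp_all

theorem stepW (rows : List (List Char)) (ce y x : Int) :
    (if 0 ≤ y ∧ y < (rows.length : Int) ∧ 0 ≤ x ∧ x < ((PySem.List.pyGetD rows y []).length : Int) then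
      ce + wC (PySem.List.pyGetD (PySem.List.pyGetD rows y []) x ' ')
     else ce) = ce + cellW rows y x := by
  unfold cellW; split_ifs <;> simp

theorem innerA (rows : List (List Char)) (i j : Int) :
    (PySem.List.pyRange 0 4 1).foldl (fun ce k =>
      let y := i + PySem.List.pyGetD posyA k 0
      let x := j + PySem.List.pyGetD posxA k 0
      if 0 ≤ y ∧ y < (rows.length : Int) ∧ 0 ≤ x ∧ x < ((PySem.List.pyGetD rows y []).length : Int) then
        let temp2 := PySem.List.pyGetD (PySem.List.pyGetD rows y []) x ' '
        let ce := if temp2 = '-' then ce + 2 else ce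
        let ce := if temp2 = '=' then ce + 4 else ce
        if temp2 = '+' then ce + 6 else ce
      else ce) 0 = gather rows i j := by
  have h4 : PySem.List.pyRange 0 4 1 = [0, 1, 2, 3] := by decide
  have hy0 : PySem.List.pyGetD posyA 0 0 = 0 := by decide
  have hy1 : PySem.List.pyGetD posyA 1 0 = -1 := by decide
  have hy2 : PySem.List.pyGetD posyA 2 0 = 0 := by decide
  have hy3 : PySem.List.pyGetD posyA 3 0 = 1 := by decide
  have hx0 : PySem.List.pyGetD posxA 0 0 = -1 := by decide
  have hx1 : PySem.List.pyGetD posxA 1 0 = 0 := by decide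
  have hx2 : PySem.List.pyGetD posxA 2 0 = 1 := by decide
  have hx3 : PySem.List.pyGetD posxA 3 0 = 0 := by decide
  rw [h4]
  simp only [List.foldl, hy0, hy1, hy2, hy3, hx0, hx1, hx2, hx3, add_zero]
  simp only [chain3, stepW, gather]
  omega


def modStep (d : PySem.Dict (Int × Int) Int) (q : (Int × Int) × Int) : PySem.Dict (Int × Int) Int :=
  d.modify q.1 0 (· + q.2)

def perCell (i j : Int) (c : Char) : List ((Int × Int) × Int) :=
  match wOpt c with
  | none => []
  | some w => dirsB.map (fun d => ((i + d.1, j + d.2), w))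

def updates (rows : List (List Char)) : List ((Int × Int) × Int) :=
  (PySem.List.enumerate rows).flatMap (fun ir =>
    (PySem.List.enumerate ir.2).flatMap (fun jc => perCell ir.1 jc.1 jc.2))

def S (l : List ((Int × Int) × Int)) (p : Int × Int) : Int :=
  ((l.filter (fun q => q.1 == p)).map (·.2)).sum

theorem foldl_flatMap {α β : Type} (g : α → List β) (step : PySem.Dict (Int × Int) Int → β → PySem.Dict (Int × Int) Int)
    (l : List α) (init : PySem.Dict (Int × Int) Int) :
    (l.flatMap g).foldl step init = l.foldl (fun a x => (g x).foldl step a) init := by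
  induction l generalizing init with
  | nil => rfl
  | cons x t ih => simp [List.flatMap_cons, List.foldl_append, ih]

theorem scatter_eq (rows : List (List Char)) :
    ((PySem.List.enumerate rows).foldl (fun acc ir =>
      (PySem.List.enumerate ir.2).foldl (fun acc jc =>
        match wOpt jc.2 with
        | none => acc
        | some w => dirsB.foldl (fun acc d =>
            acc.modify (ir.1 + d.1, jc.1 + d.2) 0 (· + w)) acc) acc) PySem.Dict.empty) =
    (updates rows).foldl modStep PySem.Dict.empty := by
  unfold updates
  rw [foldl_flatMap]
  apply PySem.List.foldl_congr_mem
  intro acc ir _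
  rw [foldl_flatMap]
  apply PySem.List.foldl_congr_mem
  intro acc jc _
  unfold perCell
  cases h : wOpt jc.2 with
  | none => rfl
  | some w => rw [List.foldl_map]; rfl

theorem mod_sum (l : List ((Int × Int) × Int)) (d : PySem.Dict (Int × Int) Int) (p : Int × Int) :
    (l.foldl modStep d).getD p 0 = d.getD p 0 + S l p := by
  induction l generalizing d with
  | nil => simp [S]
  | cons q t ih =>
    simp only [List.foldl_cons, ih, S, List.filter_cons]
    by_cases h : q.1 = p
    · simp only [modStep, PySem.Dict.getD_modify, h, beq_self_eq_true, if_pos,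
        List.map_cons, List.sum_cons]
      ring_nf
    · have hb : (q.1 == p) = false := by simp [h]
      simp only [modStep, PySem.Dict.getD_modify, hb]
      simp only [Bool.false_eq_true, if_false]
      rw [if_neg (fun hp => h hp.symm)]

theorem S_append (a b : List ((Int × Int) × Int)) (p : Int × Int) :
    S (a ++ b) p = S a p + S b p := by
  simp [S, List.filter_append]

theorem S_flatMap {α : Type} (l : List α) (g : α → List ((Int × Int) × Int)) (p : Int × Int) :
    S (l.flatMap g) p = (l.map (fun x => S (g x) p)).sum := by
  induction l with
  | nil => simp [S]
  | cons x t ih => simp [List.flatMap_cons, S_append, ih]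

-- the four neighbour targets a bond cell (i, j) of weight wC c scatters onto
def contrib (i j : Int) (c : Char) (p : Int × Int) : Int :=
  (if i = p.1 ∧ j - 1 = p.2 then wC c else 0) + (if i - 1 = p.1 ∧ j = p.2 then wC c else 0) +
  (if i = p.1 ∧ j + 1 = p.2 then wC c else 0) + (if i + 1 = p.1 ∧ j = p.2 then wC c else 0)

theorem wOpt_none {c : Char} (h : wOpt c = none) : wC c = 0 := by
  unfold wOpt at h; unfold wC; split_ifs at h ⊢ <;> simp_all

theorem wOpt_some {c : Char} {w : Int} (h : wOpt c = some w) : wC c = w := by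
  unfold wOpt at h; unfold wC; split_ifs at h ⊢ <;> simp_all

theorem S_perCell (i j : Int) (c : Char) (p : Int × Int) :
    S (perCell i j c) p = contrib i j c p := by
  unfold perCell
  cases h : wOpt c with
  | none => simp [S, contrib, wOpt_none h]
  | some w =>
    have hw := wOpt_some h
    obtain ⟨p1, p2⟩ := p
    simp only [S, dirsB, List.map_cons, List.map_nil, List.filter_cons, List.filter_nil, contrib, hw]
    simp only [beq_iff_eq, Prod.mk.injEq, add_zero,
      show ∀ j : Int, j + -1 = j - 1 from fun j => by ring]
    split_ifs <;> simp_all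

-- select-one lemma: summing 'if index = a then f elem else 0' over an enumeration
theorem selGen {α : Type} (f : α → Int) (dflt : α) (l : List α) (s a : Int) :
    ((PySem.List.enumerate l s).map (fun q => if q.1 = a then f q.2 else 0)).sum =
      if s ≤ a ∧ a < s + l.length then f (PySem.List.pyGetD l (a - s) dflt) else 0 := by
  induction l generalizing s with
  | nil =>
    rw [PySem.List.enumerate_nil]
    simp only [List.map_nil, List.sum_nil, List.length_nil]
    rw [if_neg (by push_cast; omega)]
  | cons x t ih =>
    rw [PySem.List.enumerate_cons]
    simp only [List.map_cons, List.sum_cons, ih (s + 1)]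
    by_cases h : s = a
    · rw [if_pos h, if_neg (by push_cast; omega),
          if_pos (by simp only [List.length_cons]; push_cast; omega)]
      rw [show a - s = 0 from by omega, PySem.List.pyGetD_zero_cons]
      ring
    · rw [if_neg h]
      by_cases h3 : s + 1 ≤ a ∧ a < s + 1 + t.length
      · rw [if_pos h3, if_pos (by simp only [List.length_cons]; push_cast; omega)]
        have h5 : PySem.List.pyGetD (x :: t) (a - s) dflt = PySem.List.pyGetD t (a - (s + 1)) dflt := by
          rw [PySem.List.pyGetD_eq_getElem (x :: t) dflt (by omega)
                (by simp only [List.length_cons]; push_cast; omega),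
              PySem.List.pyGetD_eq_getElem t dflt (by omega) (by push_cast; omega)]
          have h6 : (a - s).toNat = (a - (s + 1)).toNat + 1 := by omega
          simp [h6]
        rw [h5]; ring
      · rw [if_neg h3, if_neg (by simp only [List.length_cons]; push_cast at h3 ⊢; omega)]
        ring

theorem sum_if_const {α : Type} (P : Prop) [Decidable P] (l : List α) (f : α → Int) :
    (l.map (fun x => if P then f x else 0)).sum = if P then (l.map f).sum else 0 := by
  split_ifs <;> simp

theorem sel2 (rows : List (List Char)) (a b : Int) :
    ((PySem.List.enumerate rows).map (fun ir =>
      ((PySem.List.enumerate ir.2).map (fun jc =>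
        if ir.1 = a ∧ jc.1 = b then wC jc.2 else 0)).sum)).sum = cellW rows a b := by
  simp only [ite_and, sum_if_const, selGen wC ' ']
  rw [selGen (fun row => if 0 ≤ b then if b < 0 + (row.length : Int) then
        wC (PySem.List.pyGetD row (b - 0) ' ') else 0 else 0) [] rows 0 a]
  unfold cellW
  rw [show a - 0 = a from by omega, show b - 0 = b from by omega]
  split_ifs <;> push_cast at * <;> first | rfl | omega

theorem S_updates (rows : List (List Char)) (p1 p2 : Int) :
    S (updates rows) (p1, p2) = gather rows p1 p2 := by
  unfold updates
  rw [S_flatMap]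
  simp only [S_flatMap, S_perCell, contrib]
  have c1 : ∀ i j : Int, (i = p1 ∧ j - 1 = p2) = (i = p1 ∧ j = p2 + 1) := by
    intro i j; apply propext; constructor <;> (rintro ⟨h1, h2⟩; exact ⟨h1, by omega⟩)
  have c2 : ∀ i j : Int, (i - 1 = p1 ∧ j = p2) = (i = p1 + 1 ∧ j = p2) := by
    intro i j; apply propext; constructor <;> (rintro ⟨h1, h2⟩; exact ⟨by omega, h2⟩)
  have c3 : ∀ i j : Int, (i = p1 ∧ j + 1 = p2) = (i = p1 ∧ j = p2 - 1) := by
    intro i j; apply propext; constructor <;> (rintro ⟨h1, h2⟩; exact ⟨h1, by omega⟩)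
  have c4 : ∀ i j : Int, (i + 1 = p1 ∧ j = p2) = (i = p1 - 1 ∧ j = p2) := by
    intro i j; apply propext; constructor <;> (rintro ⟨h1, h2⟩; exact ⟨by omega, h2⟩)
  simp only [c1, c2, c3, c4]
  simp only [List.sum_map_add]
  rw [sel2, sel2, sel2, sel2]
  unfold gather
  have e1 : p2 + -1 = p2 - 1 := by ring
  have e2 : p1 + -1 = p1 - 1 := by ring
  rw [e1, e2]
  ring
theorem acc_getD (rows : List (List Char)) (p1 p2 : Int) :
    ((PySem.List.enumerate rows).foldl (fun acc ir =>
      (PySem.List.enumerate ir.2).foldl (fun acc jc =>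
        match wOpt jc.2 with
        | none => acc
        | some w => dirsB.foldl (fun acc d =>
            acc.modify (ir.1 + d.1, jc.1 + d.2) 0 (· + w)) acc) acc) PySem.Dict.empty).getD (p1, p2) 0
    = gather rows p1 p2 := by
  rw [scatter_eq, mod_sum, PySem.Dict.getD_empty, S_updates]
  ring

theorem main_eq (g : List String) : find_unshared_electron g = find_unshared_electron_alt g := by
  unfold find_unshared_electron find_unshared_electron_alt
  simp only [acc_getD, innerA]
  simp only [PySem.List.enumerate_eq_map_pyRange _ ' ', PySem.List.enumerate_eq_map_pyRange _ ([] : List Char),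
    List.foldl_map, PySem.List.len_eq]

-- ===== VERDICT (by name: the statement is the Claim_ definition above) =====
theorem find_unshared_electron_spec : Claim_equal_find_unshared_electron := by
  intro lewis_dot _
  unfold Spec_find_unshared_electron
  exact main_eq lewis_dot
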